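-- pv_equiv track=rewrite | github.com/NLP-Deeplearning-Club/kaggle-project | speech_recognizer/libsr/preprocessing/denoising.py | _get_longest_period
-- ===== SOURCE A (Python) =====
-- def _group_consecutives(vals, step=0):
--     """Return list of consecutive lists of numbers from vals (number list)."""
--     run = []
--     result = [run]
--     expect = None
--     for v in vals:
--         if (v == expect) or (expect is None):
--             run.append(v)
--         else:
--             run = [v]
--             result.append(run)
--         expect = v + step
--     return result
--
-- def _get_longest_period(seg_keep_array):
--     """获取最长的主干周期"""
--     cons_wav = _group_consecutives(seg_keep_array)
--     cons_wav_length = [sum(wav) for wav in cons_wav]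
--     start = 0
--     end = 0
--     for i in range(cons_wav_length.index(max(cons_wav_length)) + 1):
--         if i < cons_wav_length.index(max(cons_wav_length)):
--             start += len(cons_wav[i])
--         end += len(cons_wav[i])
--     return start, end
-- ===== SOURCE B (Python) =====
-- def _get_longest_period(seg_keep_array):
--     # Single streaming pass with O(1) extra memory: track the current run's
--     # start and running sum and the best closed span directly; no run list is
--     # built and no separate argmax / prefix-sum stages are run.
--     best_start = 0
--     best_end = 0
--     best_sum = None
--     run_start = 0
--     run_sum = 0
--     prev = None
--     for i, v in enumerate(seg_keep_array):
--         if prev is not None and v != prev: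
--             if best_sum is None or best_sum < run_sum:
--                 best_start, best_end, best_sum = run_start, i, run_sum
--             run_start, run_sum = i, 0
--         run_sum += v
--         prev = v
--     if prev is not None and (best_sum is None or best_sum < run_sum):
--         best_start, best_end = run_start, len(seg_keep_array)
--     return best_start, best_end
-- ===== Notes on version B (the rewrite author's own statement) =====
-- stated objective: faster
-- what changed: B is a single streaming pass with O(1) extra memory that maintains the current run's start index and running sum plus the best-so-far closed span, updating the best whenever a run closes; it never materialises a run list and has no separate argmax or prefix-sum stages, unlike A's staged grouping, sum list, and quadratic index(max(...)) re-evaluation.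
import Mathlib
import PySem

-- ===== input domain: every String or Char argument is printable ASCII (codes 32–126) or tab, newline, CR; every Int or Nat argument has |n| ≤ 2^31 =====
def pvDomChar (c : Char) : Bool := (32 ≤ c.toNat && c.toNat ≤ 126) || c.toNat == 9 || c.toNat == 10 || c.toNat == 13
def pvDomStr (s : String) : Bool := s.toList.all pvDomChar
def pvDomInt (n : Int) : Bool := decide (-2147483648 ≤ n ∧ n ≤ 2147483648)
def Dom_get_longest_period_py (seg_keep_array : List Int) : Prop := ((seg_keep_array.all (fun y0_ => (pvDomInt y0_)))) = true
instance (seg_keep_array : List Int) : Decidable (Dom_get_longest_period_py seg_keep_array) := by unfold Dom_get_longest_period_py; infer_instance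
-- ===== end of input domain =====

-- B replaces A's staged grouping + quadratic index(max(...)) re-evaluation by one
-- streaming pass with O(1) extra state (objective: faster, O(n)).

-- ===== PORT A =====
-- _group_consecutives(vals, step=0) as called here (step = 0, so expect = previous v);
-- Python's aliasing of `run` inside `result` means result = res ++ [run] at all times.
def groupConsecutivesStep (st : List (List Int) × List Int × Option Int) (v : Int) :
    List (List Int) × List Int × Option Int :=
  if st.2.2 = some v ∨ st.2.2 = none then (st.1, st.2.1 ++ [v], some v)
  else (st.1 ++ [st.2.1], [v], some v)

def groupConsecutives (vals : List Int) : List (List Int) :=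
  let st := vals.foldl groupConsecutivesStep ([], [], none)
  st.1 ++ [st.2.1]

def get_longest_period_py (seg_keep_array : List Int) : List Int :=
  let cons_wav := groupConsecutives seg_keep_array
  let cons_wav_length := cons_wav.map (fun wav => wav.sum)
  -- max()/index() never raise here: cons_wav_length is nonempty and contains its max
  let m := (PySem.List.max? cons_wav_length (fun y => y)).getD 0
  let idx : Nat := (PySem.List.index? cons_wav_length m).getD 0
  let se := (PySem.List.pyRange 0 ((idx : Int) + 1) 1).foldl
    (fun (p : Int × Int) i =>
      let leni : Int := (((PySem.List.pyGet? cons_wav i).getD []).length : Int)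
      (if i < (idx : Int) then p.1 + leni else p.1, p.2 + leni))
    (0, 0)
  [se.1, se.2]

-- ===== PORT B =====
-- streaming state: best span (bs, be), best closed-run sum (bsum, None before any run
-- closes), current run start index and running sum, previous element (None at start)
structure BSt where
  bs : Int
  be : Int
  bsum : Option Int
  rstart : Int
  rsum : Int
  prev : Option Int
deriving Repr, DecidableEq

-- the `for i, v in enumerate(...)` loop of Source B, i carried explicitly
def bLoop : List Int → Int → BSt → BSt
  | [], _, st => st
  | v :: vs, i, st =>
    if st.prev ≠ none ∧ st.prev ≠ some v then
      if st.bsum = none ∨ st.bsum.getD 0 < st.rsum then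
        bLoop vs (i + 1) ⟨st.rstart, i, some st.rsum, i, v, some v⟩
      else
        bLoop vs (i + 1) ⟨st.bs, st.be, st.bsum, i, v, some v⟩
    else
      bLoop vs (i + 1) ⟨st.bs, st.be, st.bsum, st.rstart, st.rsum + v, some v⟩

def get_longest_period_py_alt (seg_keep_array : List Int) : List Int :=
  let st := bLoop seg_keep_array 0 ⟨0, 0, none, 0, 0, none⟩
  if st.prev ≠ none ∧ (st.bsum = none ∨ st.bsum.getD 0 < st.rsum) then
    [st.rstart, (seg_keep_array.length : Int)]
  else [st.bs, st.be]

-- ===== PRECONDITION & SPEC =====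
def Spec_get_longest_period_py (seg_keep_array : List Int) (out : List Int) : Prop := out = get_longest_period_py_alt seg_keep_array
instance (seg_keep_array : List Int) (out : List Int) : Decidable (Spec_get_longest_period_py seg_keep_array out) := by unfold Spec_get_longest_period_py; infer_instance

-- ===== CLAIM (what is proved, stated in full; the proofs are below) =====
def Claim_equal_get_longest_period_py : Prop := ∀ (seg_keep_array : List Int), Dom_get_longest_period_py seg_keep_array → Spec_get_longest_period_py seg_keep_array (get_longest_period_py seg_keep_array)

-- ===== LEMMAS AND PROOFS =====

-- Common reference: run-length chunks of the input.
def chunkGo (v : Int) (c : Nat) : List Int → List (Int × Nat)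
  | [] => [(v, c)]
  | w :: ws => if v = w then chunkGo v (c + 1) ws else (v, c) :: chunkGo w 1 ws

theorem chunkGo_ne_nil (l : List Int) (v : Int) (c : Nat) : chunkGo v c l ≠ [] := by
  induction l generalizing v c with
  | nil => simp [chunkGo]
  | cons w ws ih => simp only [chunkGo]; split <;> simp [ih]

-- A's grouping fold equals chunkGo with runs expanded to replicate lists.
theorem groupFold_eq_chunkGo (l : List Int) (res : List (List Int)) (v : Int) (c : Nat) :
    (let st := l.foldl groupConsecutivesStep (res, List.replicate c v, some v)
     st.1 ++ [st.2.1]) =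
    res ++ (chunkGo v c l).map (fun r => List.replicate r.2 r.1) := by
  induction l generalizing res v c with
  | nil => simp [chunkGo]
  | cons w ws ih =>
    simp only [List.foldl_cons, groupConsecutivesStep, chunkGo]
    by_cases h : v = w
    · subst h
      rw [if_pos (Or.inl rfl), if_pos rfl]
      have h2 : List.replicate c v ++ [v] = List.replicate (c + 1) v :=
        (List.replicate_succ' (n := c) (a := v)).symm
      rw [h2]
      exact ih res v (c + 1)
    · have hne : ¬ ((some v = some w) ∨ ((some v : Option Int) = none)) := by simp [h]
      rw [if_neg hne, if_neg h]
      have h1 : [w] = List.replicate 1 w := rfl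
      rw [h1]
      simpa [List.append_assoc] using ih (res ++ [List.replicate c v]) w 1

theorem groupConsecutives_cons (v : Int) (vs : List Int) :
    groupConsecutives (v :: vs) =
      (chunkGo v 1 vs).map (fun r => List.replicate r.2 r.1) := by
  have h := groupFold_eq_chunkGo vs [] v 1
  simp only [groupConsecutives, List.foldl_cons, groupConsecutivesStep] at *
  simpa using h

-- first-argmax scan specification
def fam (bs : Int) (bi i : Nat) : List Int → Int × Nat
  | [] => (bs, bi)
  | s :: ss => if bs < s then fam s i (i + 1) ss else fam bs bi (i + 1) ss

theorem fam_const (ss : List Int) (M : Int) (bi i : Nat) (h : ∀ x ∈ ss, x ≤ M) :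
    fam M bi i ss = (M, bi) := by
  induction ss generalizing i with
  | nil => rfl
  | cons s ss ih =>
    have h1 : ¬ M < s := not_lt.mpr (h s (by simp))
    simp only [fam, if_neg h1]
    exact ih (i + 1) (fun x hx => h x (List.mem_cons_of_mem _ hx))

theorem fam_of_split (pre suf : List Int) (M bs : Int) (bi i : Nat)
    (hb : bs < M) (hpre : ∀ x ∈ pre, x < M) (hsuf : ∀ x ∈ suf, x ≤ M) :
    fam bs bi i (pre ++ M :: suf) = (M, i + pre.length) := by
  induction pre generalizing bs bi i with
  | nil =>
    simp only [List.nil_append, fam, if_pos hb, List.length_nil, Nat.add_zero]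
    exact fam_const suf M i (i + 1) hsuf
  | cons p pre ih =>
    have hp : p < M := hpre p (by simp)
    simp only [List.cons_append, fam]
    by_cases h : bs < p
    · rw [if_pos h, ih p i (i + 1) hp (fun x hx => hpre x (by simp [hx]))]
      simp; omega
    · rw [if_neg h, ih bs bi (i + 1) hb (fun x hx => hpre x (by simp [hx]))]
      simp; omega

-- A's index-of-max on a nonempty list is fam's first argmax.
theorem fam_eq_index_max (s0 : Int) (ss : List Int) :
    (fam s0 0 1 ss).2 =
      (PySem.List.index? (s0 :: ss)
        ((PySem.List.max? (s0 :: ss) (fun y => y)).getD 0)).getD 0 := by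
  obtain ⟨M, hM⟩ : ∃ M, PySem.List.max? (s0 :: ss) (fun y => y) = some M := by
    rcases h : PySem.List.max? (s0 :: ss) (fun y => y) with _ | M
    · exact absurd ((PySem.List.max?_eq_none_iff _ _).mp h) (by simp)
    · exact ⟨M, rfl⟩
  have hMmem : M ∈ s0 :: ss := PySem.List.max?_mem hM
  have hMmax : ∀ y ∈ s0 :: ss, y ≤ M := by
    intro y hy; simpa using PySem.List.max?_isMax hM y hy
  obtain ⟨k, hk⟩ : ∃ k, PySem.List.index? (s0 :: ss) M = some k := by
    rcases h : PySem.List.index? (s0 :: ss) M with _ | k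
    · exact absurd ((PySem.List.index?_eq_none_iff _ _).mp h) (by simp [hMmem])
    · exact ⟨k, rfl⟩
  obtain ⟨pre, suf, hsplit, hlen, hnot⟩ := (PySem.List.index?_eq_some_iff _ _ _).mp hk
  have hpre : ∀ x ∈ pre, x < M := by
    intro x hx
    have hle : x ≤ M := hMmax x (by rw [hsplit]; exact List.mem_append_left _ hx)
    have : x ≠ M := fun h => hnot (h ▸ hx)
    omega
  have hsuf : ∀ x ∈ suf, x ≤ M := by
    intro x hx
    exact hMmax x (by rw [hsplit]; exact List.mem_append_right _ (by simp [hx]))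
  rw [hM]
  simp only [Option.getD_some]
  rw [hk]
  simp only [Option.getD_some]
  cases pre with
  | nil =>
    have hs0 : s0 = M := by simpa using congrArg (fun l => l.headI) hsplit
    have hss : ss = suf := by simpa [hs0] using hsplit
    subst hs0; subst hss
    rw [fam_const ss s0 0 1 hsuf]
    simp at hlen ⊢
    omega
  | cons p pre' =>
    have hs0 : s0 = p := by
      have := congrArg List.headI hsplit; simpa using this
    subst hs0
    have hss : ss = pre' ++ M :: suf := by
      have := congrArg List.tail hsplit; simpa using this
    rw [hss]
    rw [fam_of_split pre' suf M s0 0 1 (hpre s0 (by simp))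
      (fun x hx => hpre x (by simp [hx])) hsuf]
    simp at hlen ⊢
    omega

-- A's summing loop, characterised by take-sums of the chunk lengths.
theorem loopA (cons : List (List Int)) (idx : Nat) (hidx : idx < cons.length) (k : Nat)
    (hk : k ≤ idx + 1) :
    (PySem.List.pyRange 0 (k : Int) 1).foldl
      (fun (p : Int × Int) i =>
        (if i < (idx : Int) then
            p.1 + (((PySem.List.pyGet? cons i).getD []).length : Int)
          else p.1,
         p.2 + (((PySem.List.pyGet? cons i).getD []).length : Int)))
      (0, 0) =
    (((cons.take (min k idx)).map (fun w => (w.length : Int))).sum,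
     ((cons.take k).map (fun w => (w.length : Int))).sum) := by
  induction k with
  | zero => simp [PySem.List.pyRange_one_eq_nil]
  | succ k ih =>
    have hk' : k ≤ idx + 1 := Nat.le_of_succ_le hk
    have hr : PySem.List.pyRange 0 ((k : Int) + 1) 1 =
        PySem.List.pyRange 0 (k : Int) 1 ++ [(k : Int)] := by
      exact PySem.List.pyRange_one_succ_right (by positivity)
    have hklen : k < cons.length := by omega
    have hget : PySem.List.pyGet? cons (k : Int) = some cons[k] := by
      rw [PySem.List.pyGet?_natCast]; simp [hklen]
    have htake : cons.take (k + 1) = cons.take k ++ [cons[k]] :=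
      List.take_succ_eq_append_getElem hklen
    push_cast
    rw [hr, List.foldl_append, ih hk']
    simp only [List.foldl_cons, List.foldl_nil, hget, Option.getD_some]
    by_cases hcase : k < idx
    · have h1 : (k : Int) < (idx : Int) := by exact_mod_cast hcase
      rw [if_pos h1]
      have hmin1 : min (k + 1) idx = k + 1 := by omega
      have hmin2 : min k idx = k := by omega
      rw [hmin1, hmin2, htake]
      simp
      rw [List.sum_take_succ _ k (by simpa using hklen)]
      simp
    · have hkeq : k = idx := by omega
      subst hkeq
      rw [if_neg (by omega : ¬ ((k : Int) < (k : Int)))]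
      have hmin1 : min (k + 1) k = k := by omega
      have hmin2 : min k k = k := by omega
      rw [hmin1, hmin2, htake]
      simp
      rw [List.sum_take_succ _ k (by simpa using hklen)]
      simp

-- cumulative chunk-length sums
def chLen (l : List (Int × Nat)) (n : Nat) : Int :=
  ((l.take n).map (fun r => (r.2 : Int))).sum

theorem chLen_succ (l : List (Int × Nat)) (n : Nat) (h : n < l.length) :
    chLen l (n + 1) = chLen l n + (l[n].2 : Int) := by
  unfold chLen
  rw [List.map_take, List.map_take, List.sum_take_succ _ n (by simpa using h)]
  simp

theorem fam_snd_lt (ss : List Int) (bs : Int) (bi i : Nat) (h : bi < i) :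
    (fam bs bi i ss).2 < i + ss.length := by
  induction ss generalizing bs bi i with
  | nil => simpa [fam] using h
  | cons s ss ih =>
    simp only [fam]
    by_cases hc : bs < s
    · rw [if_pos hc]
      have := ih s i (i + 1) (by omega)
      simpa [Nat.add_comm, Nat.add_left_comm] using by omega
    · rw [if_neg hc]
      have := ih bs bi (i + 1) (by omega)
      simp only [List.length_cons]
      omega

theorem A_eval (v : Int) (vs : List Int) (r0 : Int × Nat) (rs : List (Int × Nat))
    (hch : chunkGo v 1 vs = r0 :: rs) :
    get_longest_period_py (v :: vs) =
      [chLen (r0 :: rs) ((fam (r0.1 * (r0.2 : Int)) 0 1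
          (rs.map (fun r => r.1 * (r.2 : Int)))).2),
       chLen (r0 :: rs) ((fam (r0.1 * (r0.2 : Int)) 0 1
          (rs.map (fun r => r.1 * (r.2 : Int)))).2 + 1)] := by
  have hlens : ((r0 :: rs).map (fun r => List.replicate r.2 r.1)).map (fun w => w.sum) =
      (r0.1 * (r0.2 : Int)) :: rs.map (fun r => r.1 * (r.2 : Int)) := by
    simp [List.map_map, Function.comp, List.sum_replicate, mul_comm]
  set F := (fam (r0.1 * (r0.2 : Int)) 0 1 (rs.map (fun r => r.1 * (r.2 : Int)))).2 with hF
  have hFlt : F < rs.length + 1 := by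
    have h1 := fam_snd_lt (rs.map (fun r => r.1 * (r.2 : Int))) (r0.1 * (r0.2 : Int)) 0 1
      (by omega)
    rw [← hF] at h1
    simp only [List.length_map] at h1
    omega
  have hidx : (PySem.List.index? ((r0.1 * (r0.2 : Int)) :: rs.map (fun r => r.1 * (r.2 : Int)))
      ((PySem.List.max? ((r0.1 * (r0.2 : Int)) :: rs.map (fun r => r.1 * (r.2 : Int)))
        (fun y => y)).getD 0)).getD 0 = F :=
    (fam_eq_index_max (r0.1 * (r0.2 : Int)) (rs.map (fun r => r.1 * (r.2 : Int)))).symm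
  simp only [get_longest_period_py, groupConsecutives_cons, hch, hlens, hidx]
  have hcast : ((F : Int) + 1) = (((F + 1 : Nat)) : Int) := by push_cast; ring
  rw [hcast, loopA ((r0 :: rs).map (fun r => List.replicate r.2 r.1)) F
      (by simpa using hFlt) (F + 1) (by omega)]
  have hmin : min (F + 1) F = F := by omega
  rw [hmin]
  have hfun : ((fun w : List Int => ((w.length : Int))) ∘ (fun r : Int × Nat => List.replicate r.2 r.1)) =
      fun r : Int × Nat => (r.2 : Int) := by
    funext r; simp
  unfold chLen
  simp [List.map_take, List.map_map, hfun]

-- ===== B-side proof machinery =====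

-- run-level view of B's streaming loop: each run arrives as (sum, length)
def rstream : List (Int × Int) → Int → Int × Int × Option Int → Int × Int
  | [], _, st => (st.1, st.2.1)
  | (s, l) :: rl, pos, st =>
    if st.2.2 = none ∨ st.2.2.getD 0 < s then rstream rl (pos + l) (pos, pos + l, some s)
    else rstream rl (pos + l) st

-- the end-of-loop run close of Source B
def closeRun (n : Int) (st : BSt) : Int × Int :=
  if st.bsum = none ∨ st.bsum.getD 0 < st.rsum then (st.rstart, n) else (st.bs, st.be)

theorem bLoop_prev_some (vs : List Int) (i : Int) (st : BSt) (h : st.prev ≠ none) :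
    (bLoop vs i st).prev ≠ none := by
  induction vs generalizing i st with
  | nil => simpa [bLoop] using h
  | cons v vs ih =>
    simp only [bLoop]
    split
    · split <;> exact ih _ _ (by simp)
    · exact ih _ _ (by simp)

-- element-level loop = run-level stream, over the chunk decomposition
theorem bLoop_eq_rstream (vs : List Int) (p : Int) (c : Nat) (i bs be : Int)
    (bsum : Option Int) :
    closeRun (i + vs.length) (bLoop vs i ⟨bs, be, bsum, i - c, p * c, some p⟩) =
    rstream ((chunkGo p c vs).map (fun r => (r.1 * (r.2 : Int), (r.2 : Int))))
      (i - c) (bs, be, bsum) := by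
  induction vs generalizing p c i bs be bsum with
  | nil =>
    simp only [bLoop, chunkGo, List.map_cons, List.map_nil, rstream, closeRun,
      List.length_nil]
    have hic : i - (c : Int) + (c : Int) = i := by ring
    split
    · simp [hic]
    · rfl
  | cons w ws ih =>
    by_cases hpw : p = w
    · subst hpw
      have hcond : ¬ ((some p ≠ (none : Option Int)) ∧ some p ≠ some p) := by simp
      simp only [bLoop]
      rw [if_neg hcond]
      have h1 : p * (c : Int) + p = p * ((c + 1 : Nat) : Int) := by push_cast; ring
      have h2 : i - (c : Int) = (i + 1) - ((c + 1 : Nat) : Int) := by push_cast; ring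
      have h3 : (i + 1) + (ws.length : Int) = i + ((p :: ws).length : Int) := by
        simp; ring
      rw [h1, h2, ← h3]
      rw [ih p (c + 1) (i + 1) bs be bsum]
      have h4 : (i + 1) - ((c + 1 : Nat) : Int) = i - (c : Int) := by push_cast; ring
      rw [h4]
      simp [chunkGo]
    · have hcond : ((some p ≠ (none : Option Int)) ∧ some p ≠ some w) := by simp [hpw]
      simp only [bLoop]
      rw [if_pos hcond]
      have h3 : (i + 1) + (ws.length : Int) = i + ((w :: ws).length : Int) := by
        simp; ring
      have h5 : i = (i + 1) - ((1 : Nat) : Int) := by push_cast; ring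
      have h6 : w = w * ((1 : Nat) : Int) := by push_cast; ring
      have hchw : chunkGo p c (w :: ws) = (p, c) :: chunkGo w 1 ws := by
        simp [chunkGo, hpw]
      rw [hchw]
      simp only [List.map_cons, rstream]
      have hic : i - (c : Int) + (c : Int) = i := by ring
      by_cases hb : bsum = none ∨ bsum.getD 0 < p * (c : Int)
      · rw [if_pos hb]
        have := ih w 1 (i + 1) (i - (c : Int)) i (some (p * (c : Int)))
        rw [h3] at this
        rw [if_pos (by simpa using hb)]
        rw [hic]
        calc closeRun (i + ((w :: ws).length : Int))
              (bLoop ws (i + 1) ⟨i - (c : Int), i, some (p * (c : Int)), i, w, some w⟩)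
            = closeRun (i + ((w :: ws).length : Int))
              (bLoop ws (i + 1) ⟨i - (c : Int), i, some (p * (c : Int)),
                (i + 1) - ((1 : Nat) : Int), w * ((1 : Nat) : Int), some w⟩) := by
              rw [← h5, ← h6]
          _ = _ := by
              rw [this]
              congr 1
              push_cast; ring
      · rw [if_neg hb]
        have := ih w 1 (i + 1) bs be bsum
        rw [h3] at this
        rw [if_neg (by simpa using hb)]
        rw [hic]
        calc closeRun (i + ((w :: ws).length : Int))
              (bLoop ws (i + 1) ⟨bs, be, bsum, i, w, some w⟩)
            = closeRun (i + ((w :: ws).length : Int))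
              (bLoop ws (i + 1) ⟨bs, be, bsum,
                (i + 1) - ((1 : Nat) : Int), w * ((1 : Nat) : Int), some w⟩) := by
              rw [← h5, ← h6]
          _ = _ := by
              rw [this]
              congr 1
              push_cast; ring

-- run-level stream = first-argmax over run sums, in chLen coordinates
theorem rstream_eq_fam (full : List (Int × Nat)) (rl done : List (Int × Nat))
    (hfull : full = done ++ rl) (B : Int) (bi : Nat) :
    rstream (rl.map (fun r => (r.1 * (r.2 : Int), (r.2 : Int))))
      (chLen full done.length) (chLen full bi, chLen full (bi + 1), some B) =
    (chLen full (fam B bi done.length (rl.map (fun r => r.1 * (r.2 : Int)))).2,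
     chLen full ((fam B bi done.length (rl.map (fun r => r.1 * (r.2 : Int)))).2 + 1)) := by
  induction rl generalizing done B bi with
  | nil => simp [rstream, fam]
  | cons r rl ih =>
    obtain ⟨u, l⟩ := r
    have hlt : done.length < full.length := by
      subst hfull; simp
    have hget : full[done.length]'hlt = (u, l) := by
      subst hfull
      simp
    have hstep : chLen full done.length + (l : Int) = chLen full (done.length + 1) := by
      rw [chLen_succ full done.length hlt, hget]
    have hfull' : full = (done ++ [(u, l)]) ++ rl := by
      subst hfull; simp
    have hlen' : (done ++ [(u, l)]).length = done.length + 1 := by simp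
    simp only [List.map_cons, rstream, fam]
    by_cases hb : B < u * (l : Int)
    · rw [if_pos (by simp [hb]), if_pos hb, hstep]
      have := ih (done ++ [(u, l)]) hfull' (u * (l : Int)) done.length
      rw [hlen'] at this
      exact this
    · rw [if_neg (by simp [hb]), if_neg hb, hstep]
      have := ih (done ++ [(u, l)]) hfull' B bi
      rw [hlen'] at this
      exact this

theorem B_eval (v : Int) (vs : List Int) (r0 : Int × Nat) (rs : List (Int × Nat))
    (hch : chunkGo v 1 vs = r0 :: rs) :
    get_longest_period_py_alt (v :: vs) =
      [chLen (r0 :: rs) ((fam (r0.1 * (r0.2 : Int)) 0 1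
          (rs.map (fun r => r.1 * (r.2 : Int)))).2),
       chLen (r0 :: rs) ((fam (r0.1 * (r0.2 : Int)) 0 1
          (rs.map (fun r => r.1 * (r.2 : Int)))).2 + 1)] := by
  obtain ⟨s0, l0⟩ := r0
  -- first iteration of the loop: prev = none
  have hstep1 : bLoop (v :: vs) 0 ⟨0, 0, none, 0, 0, none⟩ =
      bLoop vs 1 ⟨0, 0, none, 0, v, some v⟩ := by
    simp [bLoop]
  -- rewrite the result through closeRun (prev is some after the loop)
  have hprev : (bLoop vs 1 ⟨0, 0, none, 0, v, some v⟩).prev ≠ none :=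
    bLoop_prev_some vs 1 _ (by simp)
  have halt : get_longest_period_py_alt (v :: vs) =
      [(closeRun (((v :: vs).length : Int)) (bLoop vs 1 ⟨0, 0, none, 0, v, some v⟩)).1,
       (closeRun (((v :: vs).length : Int)) (bLoop vs 1 ⟨0, 0, none, 0, v, some v⟩)).2] := by
    simp only [get_longest_period_py_alt, hstep1, closeRun]
    split
    · rename_i h
      rw [if_pos h.2]
    · rename_i h
      rw [if_neg (by tauto)]
  rw [halt]
  have hst : (⟨0, 0, none, 0, v, some v⟩ : BSt) =
      ⟨0, 0, none, (1 : Int) - ((1 : Nat) : Int), v * ((1 : Nat) : Int), some v⟩ := by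
    norm_num
  have hn : ((v :: vs).length : Int) = 1 + (vs.length : Int) := by simp; ring
  rw [hst, hn, bLoop_eq_rstream vs v 1 1 0 0 none, hch]
  have hpos : (1 : Int) - ((1 : Nat) : Int) = chLen ((s0, l0) :: rs) 0 := by
    simp [chLen]
  simp only [List.map_cons, rstream]
  rw [if_pos (by simp)]
  have h01 : ((1 : Int) - ((1 : Nat) : Int), (1 : Int) - ((1 : Nat) : Int) + (l0 : Int),
      some (s0 * (l0 : Int))) =
      (chLen ((s0, l0) :: rs) 0, chLen ((s0, l0) :: rs) (0 + 1), some (s0 * (l0 : Int))) := by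
    simp [chLen]
  rw [h01]
  have hrw : (1 : Int) - ((1 : Nat) : Int) + (l0 : Int) = chLen ((s0, l0) :: rs) 1 := by
    simp [chLen]
  rw [hrw]
  have := rstream_eq_fam ((s0, l0) :: rs) rs [(s0, l0)] (by simp) (s0 * (l0 : Int)) 0
  simp only [List.length_singleton] at this
  rw [this]

theorem main_cons (v : Int) (vs : List Int) :
    get_longest_period_py (v :: vs) = get_longest_period_py_alt (v :: vs) := by
  obtain ⟨r0, rs, hch⟩ : ∃ r0 rs, chunkGo v 1 vs = r0 :: rs := by
    cases h : chunkGo v 1 vs with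
    | nil => exact absurd h (chunkGo_ne_nil vs v 1)
    | cons a b => exact ⟨a, b, rfl⟩
  rw [A_eval v vs r0 rs hch, B_eval v vs r0 rs hch]

-- ===== VERDICT (by name: the statement is the Claim_ definition above) =====
theorem get_longest_period_py_spec : Claim_equal_get_longest_period_py := by
  intro seg _
  unfold Spec_get_longest_period_py
  cases seg with
  | nil => decide
  | cons v vs => exact main_cons v vs
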